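-- pv_equiv track=rewrite | github.com/PhilMarsh/adventofcode | 2024/22b.py | _collect_patterns_to_counts
-- ===== SOURCE A (Python) =====
-- from collections import defaultdict
--
-- _PRUNE_DIVISOR = 16777216
--
-- def _collect_patterns_to_counts(initial_secrets, num_iterations):
--     all_patterns_to_counts = defaultdict(int)
--     for secret in initial_secrets:
--         seen_secret_patterns = set()
--         for pattern, price in _yield_patterns_and_prices(secret, num_iterations):
--             if pattern not in seen_secret_patterns:
--                 all_patterns_to_counts[pattern] += price
--                 seen_secret_patterns.add(pattern)
--     return dict(all_patterns_to_counts)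
--
-- def _yield_patterns_and_prices(initial_secret, num_iterations):
--     secrets_iterators = (
--         _iter_skip(_yield_secrets(initial_secret, num_iterations), skip)
--         for skip in range(5)
--     )
--     for secrets_window in zip(*secrets_iterators):
--         prices = [_price(secret) for secret in secrets_window]
--         pattern = tuple(p2 - p1 for p1, p2 in zip(prices, prices[1:]))
--         last_price = prices[-1]
--         yield pattern, last_price
--
-- def _yield_secrets(secret, num_iterations):
--     for _ in range(num_iterations):
--         yield secret
--         secret = _next_secret(secret)
--
-- def _next_secret(initial_secret):
--     step1 = _prune(_mix(initial_secret, initial_secret * 64))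
--     step2 = _prune(_mix(step1, step1 // 32))
--     step3 = _prune(_mix(step2, step2 * 2048))
--     return step3
--
-- def _mix(secret, val):
--     return secret ^ val
--
-- def _prune(secret):
--     return secret % _PRUNE_DIVISOR
--
-- def _price(secret):
--     return secret % 10
--
-- def _iter_skip(iterator, num):
--     for _ in zip(range(num), iterator):
--         pass
--     return iterator
-- ===== SOURCE B (Python) =====
-- _PRUNE_DIVISOR = 16777216
--
--
-- def _collect_patterns_to_counts(initial_secrets, num_iterations):
--     totals = {}
--     for secret in initial_secrets:
--         first_seen = {}
--         window = []
--         s = secret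
--         for _ in range(num_iterations):
--             p = s % 10
--             window.append(p)
--             if len(window) > 5:
--                 window.pop(0)
--             if len(window) == 5:
--                 a, b, c, d, e = window
--                 pattern = (b - a, c - b, d - c, e - d)
--                 if pattern not in first_seen:
--                     first_seen[pattern] = p
--             s = (s ^ (s * 64)) % _PRUNE_DIVISOR
--             s = (s ^ (s // 32)) % _PRUNE_DIVISOR
--             s = (s ^ (s * 2048)) % _PRUNE_DIVISOR
--         for pattern, price in first_seen.items():
--             totals[pattern] = totals.get(pattern, 0) + price
--     return totals
-- ===== Notes on version B (the rewrite author's own statement) =====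
-- stated objective: faster
-- what changed: A builds five independently-skipped secret generators and zips them into 5-tuples, recomputing all five prices per window and keeping a separate seen-set per secret; B makes a single rolling pass per secret keeping only the last five prices, records each pattern's first price in a per-secret dict, and merges that dict into the totals (no zip of streams, no seen-set, each price computed once).
import Mathlib
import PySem

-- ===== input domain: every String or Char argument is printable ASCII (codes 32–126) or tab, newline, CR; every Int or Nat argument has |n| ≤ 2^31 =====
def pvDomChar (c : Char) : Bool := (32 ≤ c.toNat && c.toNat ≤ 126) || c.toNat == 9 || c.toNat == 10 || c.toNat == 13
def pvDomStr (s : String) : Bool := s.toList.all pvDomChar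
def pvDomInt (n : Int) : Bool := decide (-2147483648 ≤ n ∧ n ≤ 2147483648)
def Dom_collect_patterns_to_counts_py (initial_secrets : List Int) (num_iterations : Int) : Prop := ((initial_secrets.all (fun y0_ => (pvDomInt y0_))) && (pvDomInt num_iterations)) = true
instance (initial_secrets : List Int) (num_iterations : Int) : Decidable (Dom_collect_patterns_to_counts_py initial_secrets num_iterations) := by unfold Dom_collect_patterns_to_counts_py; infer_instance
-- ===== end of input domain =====

-- B replaces A's five skipped generators zipped into 5-windows by a single rolling pass per secret (last ≤5 prices kept) with a per-secret first-seen dict merged into the totals; same return value, same insertion order.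
-- ===== PORT A =====
-- Port of 2024/22b.py's _collect_patterns_to_counts (generators become lists; the
-- five skipped iterators zipped become pvZip5 of drops; equivalence of RETURN values only).
def pvNextSecret (initial_secret : Int) : Int :=
  let step1 := PySem.Int.mod (PySem.Int.bxor initial_secret (initial_secret * 64)) 16777216
  let step2 := PySem.Int.mod (PySem.Int.bxor step1 (PySem.Int.floordiv step1 32)) 16777216
  let step3 := PySem.Int.mod (PySem.Int.bxor step2 (step2 * 2048)) 16777216
  step3

def pvPrice (secret : Int) : Int := PySem.Int.mod secret 10

def pvYieldSecrets (secret : Int) : Nat → List Int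
  | 0 => []
  | n + 1 => secret :: pvYieldSecrets (pvNextSecret secret) n

-- zip(it0, it1, it2, it3, it4): stops at the shortest iterator, like Python's zip
def pvZip5 {α : Type} : List α → List α → List α → List α → List α → List (α × α × α × α × α)
  | a :: as, b :: bs, c :: cs, d :: ds, e :: es => (a, b, c, d, e) :: pvZip5 as bs cs ds es
  | _, _, _, _, _ => []

def pvPatternsAndPrices (initial_secret : Int) (num_iterations : Int) : List (List Int × Int) :=
  let secrets := pvYieldSecrets initial_secret num_iterations.toNat
  -- _iter_skip(_yield_secrets(...), skip) for skip in range(5), zipped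
  let windows := pvZip5 (secrets.drop 0) (secrets.drop 1) (secrets.drop 2) (secrets.drop 3) (secrets.drop 4)
  windows.map (fun w =>
    let prices := [w.1, w.2.1, w.2.2.1, w.2.2.2.1, w.2.2.2.2].map pvPrice
    let pattern := (prices.zip (PySem.List.slice prices (some 1) none)).map (fun q => q.2 - q.1)
    let last_price := PySem.List.pyGetD prices (-1) 0  -- prices[-1]; prices has 5 elements, exact
    (pattern, last_price))

def collect_patterns_to_counts_py (initial_secrets : List Int) (num_iterations : Int) : List (List Int × Int) :=
  (initial_secrets.foldl
    (fun (all_patterns_to_counts : PySem.Dict (List Int) Int) secret =>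
      ((pvPatternsAndPrices secret num_iterations).foldl
        (fun (st : PySem.Dict (List Int) Int × PySem.Set (List Int)) pp =>
          if PySem.Set.contains st.2 pp.1 then st
          else (PySem.Dict.modify st.1 pp.1 0 (· + pp.2), PySem.Set.add st.2 pp.1))
        (all_patterns_to_counts, PySem.Set.empty)).1)
    PySem.Dict.empty).items

-- ===== PORT B =====
-- B: one rolling pass per secret (window of the last ≤5 prices, per-secret first-seen dict,
-- merged into the running totals); no generators, no zip of five streams, no seen-set.
def pvLoopB (s : Int) (window : List Int) (first_seen : PySem.Dict (List Int) Int) :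
    Nat → PySem.Dict (List Int) Int
  | 0 => first_seen
  | n + 1 =>
    let p := PySem.Int.mod s 10
    let w1 := window ++ [p]
    let w2 := if 5 < w1.length then w1.tail else w1    -- append then pop(0)
    let fs :=
      match w2 with
      | [a, b, c, d, e] =>
        let pattern := [b - a, c - b, d - c, e - d]
        if first_seen.contains pattern then first_seen else first_seen.insert pattern p
      | _ => first_seen
    let s1 := PySem.Int.mod (PySem.Int.bxor s (s * 64)) 16777216
    let s2 := PySem.Int.mod (PySem.Int.bxor s1 (PySem.Int.floordiv s1 32)) 16777216
    let s3 := PySem.Int.mod (PySem.Int.bxor s2 (s2 * 2048)) 16777216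
    pvLoopB s3 w2 fs n

def collect_patterns_to_counts_py_alt (initial_secrets : List Int) (num_iterations : Int) : List (List Int × Int) :=
  (initial_secrets.foldl
    (fun (totals : PySem.Dict (List Int) Int) secret =>
      (pvLoopB secret [] PySem.Dict.empty num_iterations.toNat).items.foldl
        (fun totals pp => totals.insert pp.1 (totals.getD pp.1 0 + pp.2)) totals)
    PySem.Dict.empty).items

-- ===== PRECONDITION & SPEC =====
def Spec_collect_patterns_to_counts_py (initial_secrets : List Int) (num_iterations : Int) (out : List (List Int × Int)) : Prop := out = collect_patterns_to_counts_py_alt initial_secrets num_iterations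
instance (initial_secrets : List Int) (num_iterations : Int) (out : List (List Int × Int)) : Decidable (Spec_collect_patterns_to_counts_py initial_secrets num_iterations out) := by unfold Spec_collect_patterns_to_counts_py; infer_instance

-- ===== CLAIM (what is proved, stated in full; the proofs are below) =====
def Claim_equal_collect_patterns_to_counts_py : Prop := ∀ (initial_secrets : List Int) (num_iterations : Int), Dom_collect_patterns_to_counts_py initial_secrets num_iterations → Spec_collect_patterns_to_counts_py initial_secrets num_iterations (collect_patterns_to_counts_py initial_secrets num_iterations)

-- ===== LEMMAS AND PROOFS =====

-- The common skeleton both programs compute: the (pattern, price) stream of a price list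
def pairsRec : List Int → List (List Int × Int)
  | a :: b :: c :: d :: e :: rest => ([b - a, c - b, d - c, e - d], e) :: pairsRec (b :: c :: d :: e :: rest)
  | _ => []

-- first-seen filtering of a (pattern, price) stream into a dict
def innerFirst : List (List Int × Int) → PySem.Dict (List Int) Int → PySem.Dict (List Int) Int
  | [], F => F
  | (pat, pr) :: ps, F => innerFirst ps (if F.contains pat then F else F.insert pat pr)

-- merging an item list into a totals dict (B's merge loop, literally)
def mergeAll (D : PySem.Dict (List Int) Int) (items : List (List Int × Int)) : PySem.Dict (List Int) Int :=
  items.foldl (fun totals pp => totals.insert pp.1 (totals.getD pp.1 0 + pp.2)) D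

-- the (pattern, price) stream B's rolling window emits
def gList : List Int → List Int → List (List Int × Int)
  | _, [] => []
  | w, p :: rest =>
    let w1 := w ++ [p]
    let w2 := if 5 < w1.length then w1.tail else w1
    (match w2 with
     | [a, b, c, d, e] => [([b - a, c - b, d - c, e - d], p)]
     | _ => []) ++ gList w2 rest

theorem dec_beq (q x : List Int) : (decide (q = x)) = (q == x) := by
  cases h : q == x
  · simp [beq_eq_false_iff_ne.mp h]
  · simp [beq_iff_eq.mp h]

theorem set_add_contains (s : PySem.Set (List Int)) (x q : List Int) :
    (PySem.Set.add s x).contains q = (s.contains q || q == x) := by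
  by_cases h : x ∈ s
  · rw [PySem.Set.add_of_mem h]
    by_cases hq : q = x
    · subst hq; simp [PySem.Set.contains_eq_listContains, h]
    · simp [beq_iff_eq, hq]
  · rw [PySem.Set.add_of_not_mem h]
    simp [PySem.Set.contains_eq_listContains, List.mem_append, dec_beq]

theorem pairsRec_short : ∀ l : List Int, l.length ≤ 4 → pairsRec l = []
  | [], _ => rfl
  | [_], _ => rfl
  | [_, _], _ => rfl
  | [_, _, _], _ => rfl
  | [_, _, _, _], _ => rfl
  | _ :: _ :: _ :: _ :: _ :: _, h => by simp at h; omega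

theorem windows_eq : ∀ xs : List Int,
    (pvZip5 xs (xs.drop 1) (xs.drop 2) (xs.drop 3) (xs.drop 4)).map
      (fun w =>
        let prices := [w.1, w.2.1, w.2.2.1, w.2.2.2.1, w.2.2.2.2].map pvPrice
        let pattern := (prices.zip (PySem.List.slice prices (some 1) none)).map (fun q => q.2 - q.1)
        let last_price := PySem.List.pyGetD prices (-1) 0
        (pattern, last_price))
    = pairsRec (xs.map pvPrice)
  | a :: b :: c :: d :: e :: rest => by
    have ih := windows_eq (b :: c :: d :: e :: rest)
    simp only [List.drop_succ_cons, List.drop_zero] at ih ⊢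
    simp only [pvZip5, List.map_cons, pairsRec, PySem.List.slice_from_one]
    refine congrArg₂ _ ?_ (by simpa using ih)
    simp [PySem.List.pyGetD, PySem.List.pyGet?, PySem.List.pyIdx?, List.zip]
  | [] => by simp [pvZip5, pairsRec]
  | [a] => by simp [pvZip5, pairsRec]
  | [a, b] => by simp [pvZip5, pairsRec]
  | [a, b, c] => by simp [pvZip5, pairsRec]
  | [a, b, c, d] => by simp [pvZip5, pairsRec]

theorem patterns_eq (s n : Int) :
    pvPatternsAndPrices s n = pairsRec ((pvYieldSecrets s n.toNat).map pvPrice) := by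
  unfold pvPatternsAndPrices
  simpa using windows_eq (pvYieldSecrets s n.toNat)

theorem gList_five : ∀ (P : List Int) (a b c d e : Int),
    gList [a, b, c, d, e] P = pairsRec ([b, c, d, e] ++ P)
  | [], a, b, c, d, e => rfl
  | p :: rest, a, b, c, d, e => by
    simp only [gList, pairsRec, List.cons_append, List.nil_append]
    simp [gList_five rest b c d e p]

theorem gList_eq : ∀ (P w : List Int), w.length ≤ 4 → gList w P = pairsRec (w ++ P)
  | [], w, h => by simp [gList, pairsRec_short w (by simpa using h)]
  | p :: rest, [], _ => by
    simp only [gList, List.nil_append, List.length_cons, List.length_nil]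
    simpa using gList_eq rest [p] (by simp)
  | p :: rest, [a], _ => by
    simp only [gList, List.cons_append, List.nil_append, List.length_cons, List.length_nil]
    simpa using gList_eq rest [a, p] (by simp)
  | p :: rest, [a, b], _ => by
    simp only [gList, List.cons_append, List.nil_append, List.length_cons, List.length_nil]
    simpa using gList_eq rest [a, b, p] (by simp)
  | p :: rest, [a, b, c], _ => by
    simp only [gList, List.cons_append, List.nil_append, List.length_cons, List.length_nil]
    simpa using gList_eq rest [a, b, c, p] (by simp)
  | p :: rest, [a, b, c, d], _ => by
    simp only [gList, List.cons_append, List.nil_append, List.length_cons, List.length_nil]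
    simp [gList_five rest a b c d p, pairsRec]
  | _ :: _, _ :: _ :: _ :: _ :: _ :: _, h => by simp at h; omega

theorem loopB_eq : ∀ (n : Nat) (s : Int) (w : List Int) (F : PySem.Dict (List Int) Int),
    pvLoopB s w F n = innerFirst (gList w ((pvYieldSecrets s n).map pvPrice)) F := by
  intro n
  induction n with
  | zero => intro s w F; rfl
  | succ n ih =>
    intro s w F
    have hy : pvYieldSecrets s (n + 1) = s :: pvYieldSecrets (pvNextSecret s) n := rfl
    rw [hy, List.map_cons]
    rcases hw : (if 5 < (w ++ [PySem.Int.mod s 10]).length then (w ++ [PySem.Int.mod s 10]).tail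
        else (w ++ [PySem.Int.mod s 10])) with _ | ⟨a, _ | ⟨b, _ | ⟨c, _ | ⟨d, _ | ⟨e, _ | ⟨f, t⟩⟩⟩⟩⟩⟩ <;>
      simp only [pvLoopB, gList, pvPrice, hw] <;>
      rw [ih] <;>
      simp only [innerFirst, List.nil_append, List.singleton_append] <;>
      rfl

theorem inner_eq : ∀ (ps : List (List Int × Int)) (F : PySem.Dict (List Int) Int)
    (seen : PySem.Set (List Int)) (D0 : PySem.Dict (List Int) Int),
    (∀ q, PySem.Set.contains seen q = F.contains q) →
    (ps.foldl
      (fun (st : PySem.Dict (List Int) Int × PySem.Set (List Int)) pp =>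
        if PySem.Set.contains st.2 pp.1 then st
        else (PySem.Dict.modify st.1 pp.1 0 (· + pp.2), PySem.Set.add st.2 pp.1))
      (mergeAll D0 F.items, seen)).1
    = mergeAll D0 (innerFirst ps F).items := by
  intro ps
  induction ps with
  | nil => intro F seen D0 _; rfl
  | cons pp ps ih =>
    intro F seen D0 h
    obtain ⟨pat, pr⟩ := pp
    simp only [List.foldl_cons, innerFirst]
    have hseen := h pat
    by_cases hF : F.contains pat = true
    · simp only [hseen, hF, if_true]
      exact ih F seen D0 h
    · have hF' : F.contains pat = false := by rwa [Bool.not_eq_true] at hF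
      simp only [hseen, hF', Bool.false_eq_true, if_false]
      have hmod : PySem.Dict.modify (mergeAll D0 F.items) pat 0 (· + pr)
          = (mergeAll D0 F.items).insert pat ((mergeAll D0 F.items).getD pat 0 + pr) := rfl
      have hitems : (F.insert pat pr).items = F.items ++ [(pat, pr)] :=
        PySem.Dict.items_insert_of_not_contains F pr hF'
      have hmerge : mergeAll D0 (F.insert pat pr).items
          = (mergeAll D0 F.items).insert pat ((mergeAll D0 F.items).getD pat 0 + pr) := by
        rw [hitems]; simp [mergeAll, List.foldl_append]
      rw [hmod, ← hmerge]
      refine ih (F.insert pat pr) (PySem.Set.add seen pat) D0 (fun q => ?_)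
      rw [set_add_contains, PySem.Dict.contains_insert, h q, Bool.or_comm]

theorem per_secret_eq (secret : Int) (num_iterations : Int)
    (D0 : PySem.Dict (List Int) Int) :
    ((pvPatternsAndPrices secret num_iterations).foldl
      (fun (st : PySem.Dict (List Int) Int × PySem.Set (List Int)) pp =>
        if PySem.Set.contains st.2 pp.1 then st
        else (PySem.Dict.modify st.1 pp.1 0 (· + pp.2), PySem.Set.add st.2 pp.1))
      (D0, PySem.Set.empty)).1
    = (pvLoopB secret [] PySem.Dict.empty num_iterations.toNat).items.foldl
        (fun totals pp => totals.insert pp.1 (totals.getD pp.1 0 + pp.2)) D0 := by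
  have h1 : pvLoopB secret [] PySem.Dict.empty num_iterations.toNat
      = innerFirst (pvPatternsAndPrices secret num_iterations) PySem.Dict.empty := by
    rw [loopB_eq, gList_eq _ [] (by simp), patterns_eq]
    rfl
  have h2 := inner_eq (pvPatternsAndPrices secret num_iterations) PySem.Dict.empty
      PySem.Set.empty D0 (fun q => rfl)
  rw [h1]
  exact h2

-- ===== VERDICT (by name: the statement is the Claim_ definition above) =====
theorem collect_patterns_to_counts_py_spec : Claim_equal_collect_patterns_to_counts_py := by
  intro initial_secrets num_iterations _
  unfold Spec_collect_patterns_to_counts_py collect_patterns_to_counts_py collect_patterns_to_counts_py_alt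
  congr 1
  exact PySem.List.foldl_congr_mem initial_secrets _ _ _
    (fun D secret _ => per_secret_eq secret num_iterations D)
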